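-- pv_equiv track=rewrite | github.com/Matthew-Pidlysny/9-The-Final-Chapter | Neo-Beta (Research Tote)/bin/ultimate_number_analyzer.py | _is_factorial
-- ===== SOURCE A (Python) =====
-- def _is_factorial(n):
--     """Check if number is a factorial."""
--     if n < 1:
--         return False
--
--     fact = 1
--     i = 1
--     while fact < n:
--         i += 1
--         fact *= i
--
--     return fact == n
-- ===== SOURCE B (Python) =====
-- def _is_factorial(n):
--     """Check if number is a factorial."""
--     if n < 1:
--         return False
--     i = 1
--     while n > 1:
--         i += 1
--         if n % i != 0:
--             return False
--         n //= i
--     return True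
-- ===== Notes on version B (the rewrite author's own statement) =====
-- stated objective: alternative
-- what changed: B decides factoriality by repeatedly dividing n by successive integers counting upward, instead of A's multiplying an accumulated factorial upward until it reaches n.
import Mathlib
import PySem

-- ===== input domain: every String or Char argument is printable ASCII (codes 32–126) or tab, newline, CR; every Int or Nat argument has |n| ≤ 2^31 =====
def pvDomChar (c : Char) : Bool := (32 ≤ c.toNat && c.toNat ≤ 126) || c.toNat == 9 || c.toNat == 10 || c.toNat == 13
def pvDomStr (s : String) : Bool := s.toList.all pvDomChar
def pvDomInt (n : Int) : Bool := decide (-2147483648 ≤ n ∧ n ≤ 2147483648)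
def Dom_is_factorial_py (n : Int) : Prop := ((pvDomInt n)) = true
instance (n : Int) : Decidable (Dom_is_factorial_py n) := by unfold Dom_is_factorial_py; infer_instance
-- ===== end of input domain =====

-- B checks factoriality by dividing n down by successive integers instead of A's multiplying an accumulated factorial up to n; same cost, different algorithm.

-- ===== PORT A =====
-- A's while loop: fact starts at 1, i at 1; while fact < n: i += 1; fact *= i.
-- The proof arguments 1 ≤ fact / 1 ≤ i only justify termination; the computation is A's.
def isFactAux (fact i n : Int) (hf : 1 ≤ fact) (hi : 1 ≤ i) : Bool :=
  if fact < n then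
    isFactAux (fact * (i + 1)) (i + 1) n (by nlinarith) (by omega)
  else
    fact == n
termination_by (n - fact).toNat
decreasing_by
  have h2 : fact + 1 ≤ fact * (i + 1) := by nlinarith
  omega

def is_factorial_py (n : Int) : Bool :=
  if n < 1 then false
  else isFactAux 1 1 n (by omega) (by omega)

-- ===== PORT B =====
-- B's while loop: i starts at 1; while n > 1: i += 1; if n % i != 0: return False; n //= i.
def isFactDown (n i : Int) (hi : 1 ≤ i) : Bool :=
  if 1 < n then
    if PySem.Int.mod n (i + 1) ≠ 0 then false
    else isFactDown (PySem.Int.floordiv n (i + 1)) (i + 1) (by omega)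
  else
    true
termination_by n.toNat
decreasing_by
  rw [PySem.Int.floordiv_eq_ediv_of_pos (by omega)]
  have h1 : n / (i + 1) < n := by
    apply Int.ediv_lt_of_lt_mul (by omega)
    nlinarith
  omega

def is_factorial_py_alt (n : Int) : Bool :=
  if n < 1 then false
  else isFactDown n 1 (by omega)

-- ===== PRECONDITION & SPEC =====
def Spec_is_factorial_py (n : Int) (out : Bool) : Prop := out = is_factorial_py_alt n
instance (n : Int) (out : Bool) : Decidable (Spec_is_factorial_py n out) := by unfold Spec_is_factorial_py; infer_instance

-- ===== CLAIM (what is proved, stated in full; the proofs are below) =====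
def Claim_equal_is_factorial_py : Prop := ∀ (n : Int), Dom_is_factorial_py n → Spec_is_factorial_py n (is_factorial_py n)

-- ===== LEMMAS AND PROOFS =====

-- a factorial strictly above k₀! has index strictly above k₀
lemma factIdxLt (k₀ k : ℕ) (n : Int) (hn : 1 < n)
    (h : n * (Nat.factorial k₀ : Int) = (Nat.factorial k : Int)) : k₀ < k := by
  by_contra hc
  have hle : k ≤ k₀ := by omega
  have h1 : (Nat.factorial k : Int) ≤ (Nat.factorial k₀ : Int) := by
    exact_mod_cast Nat.factorial_le hle
  have h2 : 0 < (Nat.factorial k₀ : Int) := by exact_mod_cast Nat.factorial_pos k₀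
  nlinarith

-- A's loop, with accumulator i! , returns true iff n is k! for some k ≥ i.
lemma isFactAux_iff (fact i n : Int) (hf : 1 ≤ fact) (hi : 1 ≤ i) :
    ∀ k₀ : ℕ, (k₀ : Int) = i → fact = (Nat.factorial k₀ : Int) →
    (isFactAux fact i n hf hi = true ↔ ∃ k : ℕ, k₀ ≤ k ∧ n = (Nat.factorial k : Int)) := by
  fun_induction isFactAux fact i n hf hi with
  | case1 fact i hf hi hlt ih =>
    intro k₀ hik hfk
    rw [ih (k₀ + 1) (by push_cast; omega)
        (by rw [hfk, ← hik]; push_cast [Nat.factorial_succ]; ring)]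
    constructor
    · rintro ⟨k, hk, rfl⟩; exact ⟨k, by omega, rfl⟩
    · rintro ⟨k, hk, rfl⟩
      refine ⟨k, ?_, rfl⟩
      rcases Nat.eq_or_lt_of_le hk with rfl | h
      · exact absurd hfk (by omega)
      · omega
  | case2 fact i hf hi hge =>
    intro k₀ hik hfk
    rw [beq_iff_eq]
    constructor
    · rintro rfl; exact ⟨k₀, le_refl _, hfk⟩
    · rintro ⟨k, hk, rfl⟩
      have h1 : (Nat.factorial k₀ : Int) ≤ (Nat.factorial k : Int) := by
        exact_mod_cast Nat.factorial_le hk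
      omega

-- B's loop returns true iff n · i! is a factorial k! with k ≥ i (n ≥ 1).
lemma isFactDown_iff (n i : Int) (hi : 1 ≤ i) :
    ∀ k₀ : ℕ, 1 ≤ n → (k₀ : Int) = i →
    (isFactDown n i hi = true ↔ ∃ k : ℕ, k₀ ≤ k ∧ n * (Nat.factorial k₀ : Int) = (Nat.factorial k : Int)) := by
  fun_induction isFactDown n i hi with
  | case1 n i hi hlt hmod =>
    intro k₀ hn hik
    simp only [Bool.false_eq_true, false_iff]
    rintro ⟨k, hk, heq⟩
    have hklt : k₀ < k := factIdxLt k₀ k n hlt heq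
    obtain ⟨t, ht⟩ := Nat.factorial_dvd_factorial (Nat.succ_le_of_lt hklt)
    have ht' : (Nat.factorial k : Int) = (k₀ + 1) * (Nat.factorial k₀ : Int) * t := by
      rw [ht]; push_cast [Nat.factorial_succ]; ring
    have h2 : (0:Int) < (Nat.factorial k₀ : Int) := by exact_mod_cast Nat.factorial_pos k₀
    have hdvd : (i + 1) ∣ n := by
      refine ⟨t, mul_right_cancel₀ (a := n) (b := (Nat.factorial k₀ : Int)) (by omega) ?_⟩
      rw [heq, ht', ← hik]; ring
    exact hmod ((PySem.Int.mod_eq_zero_iff_dvd n (i + 1)).mpr hdvd)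
  | case2 n i hi hlt hmod ih =>
    intro k₀ hn hik
    have hdvd : (i + 1) ∣ n := (PySem.Int.mod_eq_zero_iff_dvd n (i + 1)).mp (by
      by_contra hc; exact hmod (by simpa using hc))
    have hfd : PySem.Int.floordiv n (i + 1) = n / (i + 1) :=
      PySem.Int.floordiv_eq_ediv_of_pos (by omega)
    have hneq : n = (i + 1) * (n / (i + 1)) := (Int.mul_ediv_cancel' hdvd).symm
    have hq1 : 1 ≤ n / (i + 1) := by nlinarith [hneq]
    rw [ih (k₀ + 1) (by rw [hfd]; exact hq1) (by push_cast; omega)]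
    have hrw : ∀ k : ℕ, (PySem.Int.floordiv n (i + 1) * (Nat.factorial (k₀ + 1) : Int) = (Nat.factorial k : Int))
        ↔ (n * (Nat.factorial k₀ : Int) = (Nat.factorial k : Int)) := by
      intro k
      rw [hfd]
      have : n * (Nat.factorial k₀ : Int) = n / (i + 1) * (Nat.factorial (k₀ + 1) : Int) := by
        push_cast [Nat.factorial_succ]
        have hik1 : ((k₀ : Int) + 1) = i + 1 := by omega
        rw [hik1]
        linear_combination (Nat.factorial k₀ : Int) * hneq
      rw [← this]
    constructor
    · rintro ⟨k, hk, h⟩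
      exact ⟨k, by omega, (hrw k).mp h⟩
    · rintro ⟨k, hk, h⟩
      exact ⟨k, factIdxLt k₀ k n hlt h, (hrw k).mpr h⟩
  | case3 n i hi hge =>
    intro k₀ hn hik
    simp only [true_iff]
    refine ⟨k₀, le_refl _, ?_⟩
    have h1 : n = 1 := by omega
    rw [h1, one_mul]

-- ===== VERDICT (by name: the statement is the Claim_ definition above) =====
theorem is_factorial_py_spec : Claim_equal_is_factorial_py := by
  intro n _
  unfold Spec_is_factorial_py is_factorial_py is_factorial_py_alt
  by_cases h : n < 1
  · simp [h]
  · simp only [if_neg h]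
    rw [Bool.eq_iff_iff]
    rw [isFactAux_iff 1 1 n (by omega) (by omega) 1 (by norm_num) (by norm_num)]
    rw [isFactDown_iff n 1 (by omega) 1 (by omega) (by norm_num)]
    simp [Nat.factorial]
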